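-- pv_equiv track=rewrite | github.com/kephircheek/lawzy | core/processing.py | dublicates
-- ===== SOURCE A (Python) =====
-- def dublicates(labels):
--     added = set()
--     dubs = dict()
--     for id in labels:
--         if labels[id] == -1 or labels[id] not in added:
--             added.add(labels[id])
--             dubs[id] = False
--         else:
--             dubs[id] = True
--
--     return dubs
-- ===== SOURCE B (Python) =====
-- def dublicates(labels):
--     first_seen = {}
--     for id in labels:
--         v = labels[id]
--         if v not in first_seen:
--             first_seen[v] = id
--     return {id: labels[id] != -1 and first_seen[labels[id]] != id for id in labels}
-- ===== Notes on version B (the rewrite author's own statement) =====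
-- stated objective: alternative
-- what changed: Replaces A's single forward scan carrying a running seen-set by two passes: one pass builds a first-occurrence index (value -> id of its first occurrence), a second pass marks each id by comparing it against that index; Pre_ excludes association lists with duplicate keys, which represent no Python dict input.
import Mathlib
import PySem

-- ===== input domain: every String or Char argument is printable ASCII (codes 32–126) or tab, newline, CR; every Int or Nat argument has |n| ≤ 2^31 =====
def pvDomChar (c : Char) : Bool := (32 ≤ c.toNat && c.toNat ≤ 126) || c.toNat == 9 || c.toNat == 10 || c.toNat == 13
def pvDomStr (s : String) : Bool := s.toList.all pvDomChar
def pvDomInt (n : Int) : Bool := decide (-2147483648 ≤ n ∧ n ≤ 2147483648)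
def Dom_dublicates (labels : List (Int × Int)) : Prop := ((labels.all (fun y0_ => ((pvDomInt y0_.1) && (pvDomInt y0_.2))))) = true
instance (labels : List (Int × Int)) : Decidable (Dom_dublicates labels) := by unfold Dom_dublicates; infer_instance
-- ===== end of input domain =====

-- B replaces A's single forward scan with a running seen-set by two passes: build a
-- first-occurrence index once, then mark each key by comparing against that index (objective: alternative).

-- ===== PORT A =====
-- the 'for id in labels' loop of A: state = (added : set, dubs : dict)
def pvLoopA (f : Int → Int) (ks : List Int) (st : List Int × PySem.Dict Int Bool) :
    List Int × PySem.Dict Int Bool :=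
  ks.foldl (fun st id =>
    let v := f id
    if v = -1 ∨ PySem.Set.contains st.1 v = false then
      (PySem.Set.add st.1 v, st.2.insert id false)
    else (st.1, st.2.insert id true)) st

def dublicates (labels : List (Int × Int)) : List (Int × Bool) :=
  let d : PySem.Dict Int Int := PySem.Dict.mk labels
  -- labels[id] always succeeds (id drawn from the dict's keys), so getD's default is never read
  (pvLoopA (fun id => d.getD id 0) d.keys (PySem.Set.empty, PySem.Dict.empty)).2.items

-- ===== PORT B =====
-- first pass of B: first_seen maps each value to the id of its first occurrence
def pvFirstSeen (f : Int → Int) (ks : List Int) : PySem.Dict Int Int :=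
  ks.foldl (fun fs id =>
    let v := f id
    if fs.contains v then fs else fs.insert v id) PySem.Dict.empty

def dublicates_alt (labels : List (Int × Int)) : List (Int × Bool) :=
  let d : PySem.Dict Int Int := PySem.Dict.mk labels
  let f : Int → Int := fun id => d.getD id 0
  let fs := pvFirstSeen f d.keys
  -- first_seen[labels[id]] always succeeds (every value was indexed), so getD's default is never read
  d.keys.map (fun id => (id, decide (f id ≠ -1) && decide (fs.getD (f id) 0 ≠ id)))

-- ===== PRECONDITION & SPEC =====
-- Pre_: the association list stands for a Python dict, whose keys are distinct; a list with
-- duplicate keys represents no dict input of A, so it is excluded.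
def Pre_dublicates (labels : List (Int × Int)) : Prop := (labels.map Prod.fst).Nodup
instance (labels : List (Int × Int)) : Decidable (Pre_dublicates labels) := by
  unfold Pre_dublicates; infer_instance

def pvWitness_dublicates : (List (Int × Int)) := [(1, 5), (2, 5), (3, -1), (4, -1)]

def Spec_dublicates (labels : List (Int × Int)) (out : List (Int × Bool)) : Prop :=
  out = dublicates_alt labels
instance (labels : List (Int × Int)) (out : List (Int × Bool)) : Decidable (Spec_dublicates labels out) := by
  unfold Spec_dublicates; infer_instance

-- ===== CLAIM (what is proved, stated in full; the proofs are below) =====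
def Claim_equal_dublicates : Prop := ∀ (labels : List (Int × Int)),
  Dom_dublicates labels → Pre_dublicates labels → Spec_dublicates labels (dublicates labels)

-- ===== LEMMAS AND PROOFS =====

-- common reference form: the marking both programs compute, as a structural recursion
def pvMark (f : Int → Int) (s : List Int) : List Int → List (Int × Bool)
  | [] => []
  | id :: rest =>
    if f id = -1 ∨ PySem.Set.contains s (f id) = false then
      (id, false) :: pvMark f (PySem.Set.add s (f id)) rest
    else
      (id, true) :: pvMark f s rest

theorem pvLoopA_items (f : Int → Int) :
    ∀ (ks : List Int) (s : List Int) (acc : PySem.Dict Int Bool),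
      ks.Nodup → (∀ id ∈ ks, acc.contains id = false) →
      ((pvLoopA f ks (s, acc)).2).items = acc.items ++ pvMark f s ks := by
  intro ks
  induction ks with
  | nil => intro s acc _ _; simp [pvLoopA, pvMark]
  | cons id rest ih =>
    intro s acc hnd hacc
    have hid : acc.contains id = false := hacc id (by simp)
    have hrest : ∀ id' ∈ rest, (acc.insert id false).contains id' = false ∧ (acc.insert id true).contains id' = false := by
      intro id' h'
      have hne : id' ≠ id := by rintro rfl; exact (List.nodup_cons.mp hnd).1 h'
      simp [PySem.Dict.contains_insert, hne, hacc id' (List.mem_cons_of_mem _ h')]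
    have hnd' : rest.Nodup := (List.nodup_cons.mp hnd).2
    simp only [pvLoopA, List.foldl_cons]
    by_cases h : f id = -1 ∨ PySem.Set.contains s (f id) = false
    · simp only [h, if_pos]
      rw [show (rest.foldl _ _) = pvLoopA f rest (PySem.Set.add s (f id), acc.insert id false) from rfl,
          ih _ _ hnd' (fun i hi => (hrest i hi).1)]
      rw [PySem.Dict.items_insert_of_not_contains (h := hid)]
      rw [pvMark, if_pos h]
      simp
    · rw [if_neg h,
          show (rest.foldl _ _) = pvLoopA f rest (s, acc.insert id true) from rfl,
          ih _ _ hnd' (fun i hi => (hrest i hi).2),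
          PySem.Dict.items_insert_of_not_contains (h := hid),
          pvMark, if_neg h]
      simp

theorem pvFirstSeen_get? (f : Int → Int) :
    ∀ (ks : List Int) (fs0 : PySem.Dict Int Int) (v : Int),
      ((ks.foldl (fun fs id =>
          let w := f id
          if fs.contains w then fs else fs.insert w id) fs0).get? v)
        = (fs0.get? v).or (ks.find? (fun k => f k == v)) := by
  intro ks
  induction ks with
  | nil => intro fs0 v; simp
  | cons id rest ih =>
    intro fs0 v
    simp only [List.foldl_cons]
    by_cases hc : fs0.contains (f id) = true
    · rw [if_pos hc, ih]
      by_cases hv : f id = v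
      · subst hv
        rw [List.find?_cons_of_pos (by simp)]
        have : (fs0.get? (f id)).isSome := by
          rw [← PySem.Dict.contains_eq_isSome_get?]; exact hc
        rcases Option.isSome_iff_exists.mp this with ⟨w, hw⟩
        rw [hw]
        rfl
      · rw [List.find?_cons_of_neg (by simp [hv])]
    · rw [if_neg hc, ih]
      have h0 : fs0.get? (f id) = none := by
        have := PySem.Dict.contains_eq_isSome_get? (d := fs0) (k := f id)
        rw [this] at hc
        simpa using hc
      by_cases hv : f id = v
      · subst hv
        rw [PySem.Dict.get?_insert_self, h0, List.find?_cons_of_pos (by simp)]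
        rfl
      · rw [PySem.Dict.get?_insert_of_ne (hne := fun h => hv h.symm),
            List.find?_cons_of_neg (by simp [hv])]

theorem pvFirstSeen_getD (f : Int → Int) (pre rest : List Int) (id : Int)
    (hnd : (pre ++ id :: rest).Nodup) :
    ((pvFirstSeen f (pre ++ id :: rest)).getD (f id) 0 = id ↔ f id ∉ pre.map f) := by
  have hget : (pvFirstSeen f (pre ++ id :: rest)).get? (f id)
      = ((pre ++ id :: rest).find? (fun k => f k == f id)) := by
    rw [show pvFirstSeen f (pre ++ id :: rest)
        = (pre ++ id :: rest).foldl (fun fs i =>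
            let w := f i
            if fs.contains w then fs else fs.insert w i) PySem.Dict.empty from rfl,
      pvFirstSeen_get?]
    simp
  rw [PySem.Dict.getD_eq_get?_getD, hget, List.find?_append]
  have hidpre : id ∉ pre := by
    have := List.disjoint_of_nodup_append hnd
    intro h; exact this h (by simp)
  by_cases hmem : f id ∈ pre.map f
  · rcases List.mem_map.mp hmem with ⟨k, hk, hfk⟩
    have : ∃ k', pre.find? (fun k => f k == f id) = some k' := by
      have : (pre.find? (fun k => f k == f id)).isSome := by
        apply List.find?_isSome.mpr; exact ⟨k, hk, by simp [hfk]⟩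
      exact Option.isSome_iff_exists.mp this
    rcases this with ⟨k', hk'⟩
    have hk'pre : k' ∈ pre := List.mem_of_find?_eq_some hk'
    have : k' ≠ id := fun h => hidpre (h ▸ hk'pre)
    simp [hk', hmem, this]
  · have hnone : pre.find? (fun k => f k == f id) = none := by
      apply List.find?_eq_none.mpr
      intro k hk
      simp only [beq_iff_eq]
      intro h; exact hmem (List.mem_map.mpr ⟨k, hk, h⟩)
    simp [hnone, hmem]

theorem pvMap_eq_pvMark (f : Int → Int) (L : List Int) (hnd : L.Nodup) :
    ∀ (rest pre : List Int) (s : List Int), L = pre ++ rest →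
      (∀ v, v ∈ s ↔ v ∈ pre.map f) →
      rest.map (fun id =>
          (id, decide (f id ≠ -1) && decide ((pvFirstSeen f L).getD (f id) 0 ≠ id)))
        = pvMark f s rest := by
  intro rest
  induction rest with
  | nil => intro pre s _ _; simp [pvMark]
  | cons id rest ih =>
    intro pre s hL hs
    have hgd := pvFirstSeen_getD f pre rest id (hL ▸ hnd)
    rw [← hL] at hgd
    have hpre' : L = (pre ++ [id]) ++ rest := by simp [hL]
    have hmemS : f id ∈ s ↔ f id ∈ pre.map f := hs (f id)
    simp only [List.map_cons]
    by_cases h1 : f id = -1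
    · rw [pvMark, if_pos (Or.inl h1)]
      have hb : decide (f id ≠ -1) = false := by simp [h1]
      rw [hb, Bool.false_and]
      rw [ih (pre ++ [id]) (PySem.Set.add s (f id)) hpre'
        (by intro v; simp [PySem.Set.mem_add, hs v, or_comm])]
    · by_cases h2 : f id ∈ s
      · -- seen before: B yields true
        have hpm : f id ∈ pre.map f := hmemS.mp h2
        have hne : (pvFirstSeen f L).getD (f id) 0 ≠ id := fun h => (hgd.mp h) hpm
        have hcond : ¬ (f id = -1 ∨ PySem.Set.contains s (f id) = false) := by
          push Not
          exact ⟨h1, by simp [h2]⟩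
        rw [pvMark, if_neg hcond]
        have hb : (decide (f id ≠ -1) && decide ((pvFirstSeen f L).getD (f id) 0 ≠ id)) = true := by
          simp [h1, hne]
        rw [hb]
        rw [ih (pre ++ [id]) s hpre'
          (by intro v; rw [hs v]; simp [List.mem_append]; intro hv; rw [hv]; exact List.mem_map.mp hpm)]
      · -- first occurrence: B yields false
        have hpm : f id ∉ pre.map f := fun h => h2 (hmemS.mpr h)
        have heq : (pvFirstSeen f L).getD (f id) 0 = id := hgd.mpr hpm
        rw [pvMark, if_pos (Or.inr (by simp [h2]))]
        have hb : (decide (f id ≠ -1) && decide ((pvFirstSeen f L).getD (f id) 0 ≠ id)) = false := by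
          simp [heq]
        rw [hb]
        rw [ih (pre ++ [id]) (PySem.Set.add s (f id)) hpre'
          (by intro v; simp [PySem.Set.mem_add, hs v, or_comm])]

-- ===== VERDICT (by name: the statement is the Claim_ definition above) =====
theorem dublicates_spec : Claim_equal_dublicates := by
  intro labels _ hpre
  unfold Spec_dublicates
  simp only [dublicates, dublicates_alt]
  have hnd : ((PySem.Dict.mk labels).keys).Nodup := by
    simpa [PySem.Dict.keys] using hpre
  rw [pvLoopA_items _ _ _ _ hnd (fun id _ => by simp),
      pvMap_eq_pvMark (fun id => (PySem.Dict.mk labels).getD id 0) ((PySem.Dict.mk labels).keys)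
        hnd ((PySem.Dict.mk labels).keys) [] [] rfl (by simp)]
  rfl
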